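-- pv_equiv track=rewrite | github.com/ItayTurniansky/Python-Projects | Web Scraper/search.py | create_first_pages_dict
-- ===== SOURCE A (Python) =====
-- def create_first_pages_dict(search_list, words_dict_func, ranking_dict_func):
--     """creates the initial pages dictionary"""
--     pages_with_words_dict = {}
--     counter = 0
--     for page_in_rank in ranking_dict_func.keys():
--         for word in search_list:
--             if word in words_dict_func.keys():
--                 if page_in_rank in words_dict_func[word].keys():
--                     counter += 1
--         if counter == len(search_list):
--             pages_with_words_dict[page_in_rank] = ranking_dict_func[page_in_rank]
--         counter = 0
--     return pages_with_words_dict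
-- ===== SOURCE B (Python) =====
-- def create_first_pages_dict(search_list, words_dict_func, ranking_dict_func):
--     """creates the initial pages dictionary"""
--     if not search_list:
--         return dict(ranking_dict_func)
--     first, *rest = search_list
--     if first not in words_dict_func:
--         return {}
--     common = set(words_dict_func[first].keys())
--     for word in rest:
--         if word not in words_dict_func:
--             return {}
--         common &= set(words_dict_func[word].keys())
--     return {page: rank for page, rank in ranking_dict_func.items() if page in common}
-- ===== Notes on version B (the rewrite author's own statement) =====
-- stated objective: faster
-- what changed: Instead of rescanning every search word for every ranking page (per-page counter), B intersects the per-word page-key sets once and then filters the ranking dict in a single pass, short-circuiting to {} as soon as a search word is unknown.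
import Mathlib
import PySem

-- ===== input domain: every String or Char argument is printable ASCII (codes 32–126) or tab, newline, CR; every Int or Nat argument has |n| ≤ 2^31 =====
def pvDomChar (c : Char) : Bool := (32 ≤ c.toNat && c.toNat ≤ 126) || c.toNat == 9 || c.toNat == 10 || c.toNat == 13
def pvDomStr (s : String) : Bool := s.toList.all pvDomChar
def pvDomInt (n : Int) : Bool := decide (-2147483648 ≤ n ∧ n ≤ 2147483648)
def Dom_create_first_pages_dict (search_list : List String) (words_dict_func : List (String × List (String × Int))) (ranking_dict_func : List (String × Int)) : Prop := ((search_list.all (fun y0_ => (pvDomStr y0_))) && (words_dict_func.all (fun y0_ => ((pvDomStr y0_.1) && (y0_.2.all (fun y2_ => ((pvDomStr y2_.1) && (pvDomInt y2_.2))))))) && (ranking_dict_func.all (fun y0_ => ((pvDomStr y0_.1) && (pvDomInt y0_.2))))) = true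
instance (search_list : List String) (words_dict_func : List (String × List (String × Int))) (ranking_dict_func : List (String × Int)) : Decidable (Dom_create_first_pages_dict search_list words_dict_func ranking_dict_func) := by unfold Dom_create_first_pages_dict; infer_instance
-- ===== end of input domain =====

-- B replaces A's per-page rescan of all search words by one intersection of the per-word
-- page-key sets followed by a single filtering pass over the ranking dict (objective: faster).

-- ===== PORT A =====
def create_first_pages_dict (search_list : List String) (words_dict_func : List (String × List (String × Int))) (ranking_dict_func : List (String × Int)) : List (String × Int) :=
  let wd : PySem.Dict String (List (String × Int)) := PySem.Dict.ofList words_dict_func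
  let rd : PySem.Dict String Int := PySem.Dict.ofList ranking_dict_func
  ((PySem.Dict.keys rd).foldl
    (fun (pages_with_words_dict : PySem.Dict String Int) page_in_rank =>
      let counter : Int :=
        search_list.foldl
          (fun (counter : Int) word =>
            if PySem.Dict.contains wd word then
              if ((PySem.Dict.getD wd word []).map (fun kv => kv.1)).contains page_in_rank then
                counter + 1
              else counter
            else counter) 0
      if counter = (search_list.length : Int) then
        PySem.Dict.insert pages_with_words_dict page_in_rank (PySem.Dict.getD rd page_in_rank 0)
      else pages_with_words_dict)
    PySem.Dict.empty).items

-- ===== PORT B =====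
-- helper = Source B's 'for word in rest' loop: intersect the page-key sets; none = some word unknown
def pv_common_pages (wd : PySem.Dict String (List (String × Int))) : List String → PySem.Set String → Option (PySem.Set String)
  | [], common => some common
  | word :: rest, common =>
    match PySem.Dict.get? wd word with
    | none => none
    | some pages => pv_common_pages wd rest (PySem.Set.inter common (PySem.Set.ofList (pages.map (fun kv => kv.1))))

def create_first_pages_dict_alt (search_list : List String) (words_dict_func : List (String × List (String × Int))) (ranking_dict_func : List (String × Int)) : List (String × Int) :=
  let rd : PySem.Dict String Int := PySem.Dict.ofList ranking_dict_func
  match search_list with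
  | [] => rd.items
  | first :: rest =>
    match PySem.Dict.get? (PySem.Dict.ofList words_dict_func) first with
    | none => []
    | some pages =>
      match pv_common_pages (PySem.Dict.ofList words_dict_func) rest (PySem.Set.ofList (pages.map (fun kv => kv.1))) with
      | none => []
      | some common => rd.items.filter (fun pr => PySem.Set.contains common pr.1)

-- ===== PRECONDITION & SPEC =====
def Spec_create_first_pages_dict (search_list : List String) (words_dict_func : List (String × List (String × Int))) (ranking_dict_func : List (String × Int)) (out : List (String × Int)) : Prop := out = create_first_pages_dict_alt search_list words_dict_func ranking_dict_func
instance (search_list : List String) (words_dict_func : List (String × List (String × Int))) (ranking_dict_func : List (String × Int)) (out : List (String × Int)) : Decidable (Spec_create_first_pages_dict search_list words_dict_func ranking_dict_func out) := by unfold Spec_create_first_pages_dict; infer_instance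

-- ===== CLAIM (what is proved, stated in full; the proofs are below) =====
def Claim_equal_create_first_pages_dict : Prop := ∀ (search_list : List String) (words_dict_func : List (String × List (String × Int))) (ranking_dict_func : List (String × Int)), Dom_create_first_pages_dict search_list words_dict_func ranking_dict_func → Spec_create_first_pages_dict search_list words_dict_func ranking_dict_func (create_first_pages_dict search_list words_dict_func ranking_dict_func)

-- ===== LEMMAS AND PROOFS =====

-- "word is a usable search word for this page" — A's inner-loop test as a predicate
def pvCond (wd : PySem.Dict String (List (String × Int))) (page w : String) : Bool :=
  PySem.Dict.contains wd w && ((PySem.Dict.getD wd w []).map (fun kv => kv.1)).contains page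

lemma pvCond_iff (wd : PySem.Dict String (List (String × Int))) (page w : String) :
    pvCond wd page w = true ↔ ∃ pages, PySem.Dict.get? wd w = some pages ∧ page ∈ pages.map (fun kv => kv.1) := by
  unfold pvCond
  rw [PySem.Dict.contains_eq_isSome_get?, PySem.Dict.getD_eq_get?_getD]
  cases _hw : PySem.Dict.get? wd w <;> simp

lemma nested_if_count (c1 c2 : Bool) (n : Int) :
    (if c1 then (if c2 then n + 1 else n) else n) = (if (c1 && c2) then n + 1 else n) := by
  cases c1 <;> cases c2 <;> simp

-- A computes the filter of the ranking items by "every search word hits this page"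
lemma a_eq_filter (search_list : List String) (words_dict_func : List (String × List (String × Int))) (ranking_dict_func : List (String × Int)) :
    create_first_pages_dict search_list words_dict_func ranking_dict_func
      = (PySem.Dict.ofList ranking_dict_func).items.filter
          (fun kv => search_list.all (fun w => pvCond (PySem.Dict.ofList words_dict_func) kv.1 w)) := by
  unfold create_first_pages_dict
  set wd := PySem.Dict.ofList words_dict_func with hwd
  set rd := PySem.Dict.ofList ranking_dict_func with hrd
  have hnd : (PySem.Dict.keys rd).Nodup := PySem.Dict.nodup_keys_ofList ranking_dict_func
  have hcond : ∀ (p : String) (d e : PySem.Dict String Int),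
      (if (search_list.foldl
            (fun (counter : Int) word =>
              if PySem.Dict.contains wd word then
                if ((PySem.Dict.getD wd word []).map (fun kv => kv.1)).contains p then counter + 1
                else counter
              else counter) 0) = (search_list.length : Int) then d else e)
        = (if search_list.all (fun w => pvCond wd p w) then d else e) := by
    intro p d e
    have h1 : (search_list.foldl
            (fun (counter : Int) word =>
              if PySem.Dict.contains wd word then
                if ((PySem.Dict.getD wd word []).map (fun kv => kv.1)).contains p then counter + 1
                else counter
              else counter) 0)
        = (search_list.countP (fun w => pvCond wd p w) : Int) := by
      simp only [nested_if_count]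
      rw [PySem.List.foldl_count_if]
      simp only [zero_add]
      rfl
    rw [h1]
    refine if_congr ?_ rfl rfl
    rw [Nat.cast_inj, List.countP_eq_length, List.all_eq_true]
  simp only [hcond]
  rw [← List.foldl_filter]
  rw [PySem.Dict.items_foldl_insert_fresh
        ((PySem.Dict.keys rd).filter (fun p => search_list.all (fun w => pvCond wd p w)))
        (fun p => p) (fun p => PySem.Dict.getD rd p 0) PySem.Dict.empty
        (by intro a _; exact PySem.Dict.contains_empty a)
        (by simpa using hnd.filter _)]
  rw [PySem.Dict.items_eq_map_keys rd hnd 0, List.filter_map]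
  simp [PySem.Dict.empty, Function.comp_def]

-- what the intersection loop returns
lemma common_none (wd : PySem.Dict String (List (String × Int))) :
    ∀ (rest : List String) (acc : PySem.Set String),
      pv_common_pages wd rest acc = none → ∃ w ∈ rest, PySem.Dict.get? wd w = none := by
  intro rest
  induction rest with
  | nil => intro acc h; simp [pv_common_pages] at h
  | cons w ws ih =>
    intro acc h
    unfold pv_common_pages at h
    cases hw : PySem.Dict.get? wd w with
    | none => exact ⟨w, by simp, hw⟩
    | some pages =>
      rw [hw] at h
      obtain ⟨w', hw', hnone⟩ := ih _ h
      exact ⟨w', by simp [hw'], hnone⟩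

lemma common_some (wd : PySem.Dict String (List (String × Int))) :
    ∀ (rest : List String) (acc common : PySem.Set String),
      pv_common_pages wd rest acc = some common →
      ∀ p, (p ∈ common ↔ p ∈ acc ∧ ∀ w ∈ rest, ∃ pages, PySem.Dict.get? wd w = some pages ∧ p ∈ pages.map (fun kv => kv.1)) := by
  intro rest
  induction rest with
  | nil =>
    intro acc common h p
    simp only [pv_common_pages, Option.some.injEq] at h
    subst h; simp
  | cons w ws ih =>
    intro acc common h p
    unfold pv_common_pages at h
    cases hw : PySem.Dict.get? wd w with
    | none => rw [hw] at h; exact absurd h (by simp)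
    | some pages =>
      rw [hw] at h
      have := ih _ _ h p
      rw [this, PySem.Set.mem_inter, PySem.Set.mem_ofList]
      constructor
      · rintro ⟨⟨hacc, hpg⟩, hrest⟩
        refine ⟨hacc, ?_⟩
        intro w' hw'
        rcases List.mem_cons.mp hw' with h1 | h1
        · exact ⟨pages, by rw [h1]; exact hw, hpg⟩
        · exact hrest w' h1
      · rintro ⟨hacc, hall⟩
        obtain ⟨pg, hpg1, hpg2⟩ := hall w (by simp)
        rw [hw] at hpg1
        refine ⟨⟨hacc, by injection hpg1 with h1; rw [h1]; exact hpg2⟩, ?_⟩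
        intro w' hw'
        exact hall w' (by simp [hw'])

-- ===== VERDICT (by name: the statement is the Claim_ definition above) =====
theorem create_first_pages_dict_spec : Claim_equal_create_first_pages_dict := by
  intro search_list words_dict_func ranking_dict_func _
  unfold Spec_create_first_pages_dict
  rw [a_eq_filter]
  unfold create_first_pages_dict_alt
  set wd := PySem.Dict.ofList words_dict_func with hwd
  set rd := PySem.Dict.ofList ranking_dict_func with hrd
  cases search_list with
  | nil => simp
  | cons first rest =>
    cases hf : PySem.Dict.get? wd first with
    | none =>
      simp only [hf]
      rw [List.filter_eq_nil_iff]
      intro kv _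
      simp [List.all_cons, pvCond, PySem.Dict.contains_eq_isSome_get?, hf]
    | some pages =>
      simp only [hf]
      cases hc : pv_common_pages wd rest (PySem.Set.ofList (pages.map (fun kv => kv.1))) with
      | none =>
        obtain ⟨w, hwmem, hwnone⟩ := common_none wd _ _ hc
        rw [List.filter_eq_nil_iff]
        intro kv _
        simp only [List.all_cons, List.all_eq_true, Bool.and_eq_true, not_and]
        intro _ hall
        have := hall w hwmem
        rw [pvCond_iff] at this
        obtain ⟨pg, hpg, _⟩ := this
        rw [hwnone] at hpg
        exact absurd hpg (by simp)
      | some common =>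
        apply List.filter_congr
        intro kv _
        have hmem := common_some wd _ _ _ hc kv.1
        have hL : ((first :: rest).all (fun w => pvCond wd kv.1 w) = true)
            ↔ (PySem.Set.contains common kv.1 = true) := by
          rw [PySem.Set.contains_iff, hmem, PySem.Set.mem_ofList]
          simp only [List.all_cons, Bool.and_eq_true, List.all_eq_true, pvCond_iff]
          constructor
          · rintro ⟨⟨pg, hpg, hin⟩, hrest⟩
            rw [hf] at hpg
            injection hpg with h1
            exact ⟨by rw [h1]; exact hin, hrest⟩
          · rintro ⟨hin, hrest⟩
            exact ⟨⟨pages, hf, hin⟩, hrest⟩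
        cases hA : (first :: rest).all (fun w => pvCond wd kv.1 w) <;>
          cases hB : PySem.Set.contains common kv.1
        · rfl
        · rw [hA, hB] at hL; simp at hL
        · rw [hA, hB] at hL; simp at hL
        · rfl
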